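-- pv_equiv track=rewrite | github.com/moonshine-ai/moonshine-g2p2 | scripts/bert_vocab_tokenizer.py | _final_ws_join_split
-- ===== SOURCE A (Python) =====
-- def _strip_ann(seq: list[tuple[str, int, int]]) -> list[tuple[str, int, int]]:
--     while seq and seq[0][0] == " ":
--         seq = seq[1:]
--     while seq and seq[-1][0] == " ":
--         seq = seq[:-1]
--     return seq
--
-- def _final_ws_join_split(
--     punc_pieces: list[list[tuple[str, int, int]]],
-- ) -> list[list[tuple[str, int, int]]]:
--     """Mirror ``whitespace_tokenize(" ".join(...))``; each word is char-level ``(c, lo, hi)``."""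
--     if not punc_pieces:
--         return []
--     merged: list[tuple[str, int, int]] = []
--     for i, p in enumerate(punc_pieces):
--         if not p:
--             continue
--         if i > 0 and merged:
--             lo = p[0][1]
--             merged.append((" ", lo, lo))
--         merged.extend(p)
--     merged = _strip_ann(merged)
--     if not merged:
--         return []
--     words: list[list[tuple[str, int, int]]] = []
--     cur: list[tuple[str, int, int]] = []
--     for t in merged:
--         if t[0] == " ":
--             if cur:
--                 words.append(cur)
--                 cur = []
--         else:
--             cur.append(t)
--     if cur:
--         words.append(cur)
--     return words
-- ===== SOURCE B (Python) =====
-- def _final_ws_join_split(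
--     punc_pieces: list[list[tuple[str, int, int]]],
-- ) -> list[list[tuple[str, int, int]]]:
--     """Single pass: every piece boundary is a word boundary and space tokens
--     only ever separate words, so merge/strip/re-split is unnecessary."""
--     words: list[list[tuple[str, int, int]]] = []
--     for p in punc_pieces:
--         cur: list[tuple[str, int, int]] = []
--         for t in p:
--             if t[0] == " ":
--                 if cur:
--                     words.append(cur)
--                     cur = []
--             else:
--                 cur.append(t)
--         if cur:
--             words.append(cur)
--     return words
-- ===== Notes on version B (the rewrite author's own statement) =====
-- stated objective: simpler
-- what changed: Replaces the three-phase merge-with-separators / strip / re-split pipeline with one pass that splits each piece into words directly, flushing the current word at space tokens and piece boundaries; no separator tokens are ever materialised and _strip_ann disappears.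
import Mathlib
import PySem

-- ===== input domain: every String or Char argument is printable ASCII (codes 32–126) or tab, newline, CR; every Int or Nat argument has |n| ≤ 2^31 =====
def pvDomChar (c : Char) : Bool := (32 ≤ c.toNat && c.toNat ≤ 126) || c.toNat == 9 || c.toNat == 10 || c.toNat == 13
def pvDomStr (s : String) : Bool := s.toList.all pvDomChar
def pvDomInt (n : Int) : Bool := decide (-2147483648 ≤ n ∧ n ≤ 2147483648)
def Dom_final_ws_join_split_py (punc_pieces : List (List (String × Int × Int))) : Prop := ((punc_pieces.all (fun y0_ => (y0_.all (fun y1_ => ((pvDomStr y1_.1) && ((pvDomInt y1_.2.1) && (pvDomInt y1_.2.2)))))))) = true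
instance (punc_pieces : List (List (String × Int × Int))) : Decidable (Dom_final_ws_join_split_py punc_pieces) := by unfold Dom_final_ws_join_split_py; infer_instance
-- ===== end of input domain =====

-- B replaces A's merge-with-separators / strip / re-split pipeline by one pass that
-- splits each piece directly, flushing the current word at spaces and piece ends (simpler).

-- ===== PORT A =====
-- `while seq and seq[0][0] == " ": seq = seq[1:]`
def pvStripLead : List (String × Int × Int) → List (String × Int × Int)
  | [] => []
  | t :: r => if t.1 = " " then pvStripLead r else t :: r

-- `while seq and seq[-1][0] == " ": seq = seq[:-1]`
def pvStripTrail (seq : List (String × Int × Int)) : List (String × Int × Int) :=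
  match h : seq.getLast? with
  | some t => if t.1 = " " then pvStripTrail seq.dropLast else seq
  | none => seq
termination_by seq.length
decreasing_by
  cases seq with
  | nil => simp at h
  | cons a r => simp [List.length_dropLast]

def pvStripAnn (seq : List (String × Int × Int)) : List (String × Int × Int) :=
  pvStripTrail (pvStripLead seq)

-- body of `for i, p in enumerate(punc_pieces): …`
def pvMergeStep (m : List (String × Int × Int)) (ip : Int × List (String × Int × Int)) :
    List (String × Int × Int) :=
  match ip.2 with
  | [] => m
  | t :: _ => (if ip.1 > 0 ∧ m ≠ [] then m ++ [(" ", t.2.1, t.2.1)] else m) ++ ip.2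

-- body of `for t in merged: …` with state (words, cur)
def pvAStep (st : List (List (String × Int × Int)) × List (String × Int × Int))
    (t : String × Int × Int) :
    List (List (String × Int × Int)) × List (String × Int × Int) :=
  if t.1 = " " then (if st.2 ≠ [] then (st.1 ++ [st.2], []) else st)
  else (st.1, st.2 ++ [t])

def final_ws_join_split_py (punc_pieces : List (List (String × Int × Int))) :
    List (List (String × Int × Int)) :=
  if punc_pieces = [] then []
  else
    let merged := (PySem.List.enumerate punc_pieces).foldl pvMergeStep []
    let merged := pvStripAnn merged
    if merged = [] then []
    else
      let s := merged.foldl pvAStep ([], [])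
      if s.2 ≠ [] then s.1 ++ [s.2] else s.1

-- ===== PORT B =====
-- inner `for t in p: …` body of B, state (words, cur)
def pvBStep (st : List (List (String × Int × Int)) × List (String × Int × Int))
    (t : String × Int × Int) :
    List (List (String × Int × Int)) × List (String × Int × Int) :=
  if t.1 = " " then (if st.2 ≠ [] then (st.1 ++ [st.2], []) else st)
  else (st.1, st.2 ++ [t])

-- per-piece body of B: split p starting from empty cur, flush cur at the end
def pvBPiece (words : List (List (String × Int × Int))) (p : List (String × Int × Int)) :
    List (List (String × Int × Int)) :=
  let s := p.foldl pvBStep (words, [])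
  if s.2 ≠ [] then s.1 ++ [s.2] else s.1

def final_ws_join_split_py_alt (punc_pieces : List (List (String × Int × Int))) :
    List (List (String × Int × Int)) :=
  punc_pieces.foldl pvBPiece []

-- ===== PRECONDITION & SPEC =====
def Spec_final_ws_join_split_py (punc_pieces : List (List (String × Int × Int))) (out : List (List (String × Int × Int))) : Prop := out = final_ws_join_split_py_alt punc_pieces
instance (punc_pieces : List (List (String × Int × Int))) (out : List (List (String × Int × Int))) : Decidable (Spec_final_ws_join_split_py punc_pieces out) := by unfold Spec_final_ws_join_split_py; infer_instance

-- ===== CLAIM (what is proved, stated in full; the proofs are below) =====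
def Claim_equal_final_ws_join_split_py : Prop := ∀ (punc_pieces : List (List (String × Int × Int))), Dom_final_ws_join_split_py punc_pieces → Spec_final_ws_join_split_py punc_pieces (final_ws_join_split_py punc_pieces)

-- ===== LEMMAS AND PROOFS =====

-- finalize a split state: flush the pending word
def pvFin (st : List (List (String × Int × Int)) × List (String × Int × Int)) :
    List (List (String × Int × Int)) :=
  if st.2 ≠ [] then st.1 ++ [st.2] else st.1

-- simplified merge step (the `i > 0` test is redundant once m ≠ [])
def pvMergeSimple (m : List (String × Int × Int)) (p : List (String × Int × Int)) :
    List (String × Int × Int) :=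
  match p with
  | [] => m
  | t :: _ => (if m ≠ [] then m ++ [(" ", t.2.1, t.2.1)] else m) ++ p

-- a nonempty piece preceded by its separator token
def pvSep (p : List (String × Int × Int)) : List (String × Int × Int) :=
  match p with
  | [] => []
  | t :: _ => (" ", t.2.1, t.2.1) :: p

theorem pvAStep_eq_pvBStep : pvAStep = pvBStep := rfl

theorem pvStripTrail_nil : pvStripTrail [] = [] := by rw [pvStripTrail]; rfl

theorem pvStripTrail_eq_self (seq : List (String × Int × Int))
    (h : ∀ t, seq.getLast? = some t → t.1 ≠ " ") : pvStripTrail seq = seq := by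
  rw [pvStripTrail]
  split
  · rename_i t' heq; simp [h t' heq]
  · rfl

theorem pvBPiece_eq (words : List (List (String × Int × Int)))
    (p : List (String × Int × Int)) :
    pvBPiece words p = pvFin (p.foldl pvAStep (words, [])) := by
  simp only [pvBPiece, pvFin, pvAStep_eq_pvBStep]

theorem pvStripTrail_space (seq : List (String × Int × Int)) (t : String × Int × Int)
    (h : seq.getLast? = some t) (hsp : t.1 = " ") :
    pvStripTrail seq = pvStripTrail seq.dropLast := by
  rw [pvStripTrail]
  split
  · rename_i t' heq
    rw [h] at heq; injection heq with heq'; subst heq'; simp [hsp]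
  · rename_i heq; rw [h] at heq; cases heq

theorem pvMergeStep_pos (m : List (String × Int × Int)) (i : Int)
    (p : List (String × Int × Int)) (hi : 0 < i) :
    pvMergeStep m (i, p) = pvMergeSimple m p := by
  cases p with
  | nil => rfl
  | cons t r =>
    simp only [pvMergeStep, pvMergeSimple]
    by_cases hm : m = [] <;> simp [hm, hi]

theorem pvMerge_enum (pp : List (List (String × Int × Int))) :
    ∀ (k : Int) (m : List (String × Int × Int)), 0 < k →
      (PySem.List.enumerate pp k).foldl pvMergeStep m = pp.foldl pvMergeSimple m := by
  induction pp with
  | nil => intro k m _; simp [PySem.List.enumerate_nil]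
  | cons p pp ih =>
    intro k m hk
    rw [PySem.List.enumerate_cons]
    simp only [List.foldl_cons]
    rw [pvMergeStep_pos m k p hk, ih (k + 1) _ (by omega)]

theorem pvMergeSimple_ne (pp : List (List (String × Int × Int))) :
    ∀ (m : List (String × Int × Int)), m ≠ [] →
      pp.foldl pvMergeSimple m = m ++ pp.flatMap pvSep := by
  induction pp with
  | nil => intro m _; simp
  | cons p pp ih =>
    intro m hm
    cases p with
    | nil => simpa [pvMergeSimple, pvSep] using ih m hm
    | cons t r =>
      simp only [List.foldl_cons, pvMergeSimple, pvSep, List.flatMap_cons]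
      rw [ih _ (by simp)]
      simp [hm]

-- stripping leading spaces is invisible to the split when cur = []
theorem pvLead (xs : List (String × Int × Int)) :
    ∀ ws, (pvStripLead xs).foldl pvAStep (ws, []) = xs.foldl pvAStep (ws, []) := by
  induction xs with
  | nil => intro ws; rfl
  | cons t r ih =>
    intro ws
    by_cases h : t.1 = " "
    · simp only [pvStripLead, h, if_pos, List.foldl_cons]
      rw [ih ws]
      simp [pvAStep, h]
    · simp [pvStripLead, h]

theorem pvFin_pvAStep_space (st : List (List (String × Int × Int)) × List (String × Int × Int))
    (t : String × Int × Int) (h : t.1 = " ") :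
    pvFin (pvAStep st t) = pvFin st := by
  by_cases hc : st.2 = [] <;> simp [pvAStep, pvFin, h, hc]

-- stripping trailing spaces is invisible to the finalized split
theorem pvTrail (xs : List (String × Int × Int)) :
    ∀ st, pvFin ((pvStripTrail xs).foldl pvAStep st) = pvFin (xs.foldl pvAStep st) := by
  induction xs using pvStripTrail.induct with
  | case1 seq t h hsp ih =>
    intro st
    rw [pvStripTrail_space seq t h hsp, ih st]
    have hne : seq ≠ [] := by intro e; rw [e] at h; simp at h
    conv_rhs => rw [← List.dropLast_concat_getLast hne]
    rw [List.foldl_append]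
    simp only [List.foldl_cons, List.foldl_nil]
    rw [pvFin_pvAStep_space]
    rw [List.getLast?_eq_some_getLast hne] at h
    injection h with h'
    rw [h']; exact hsp
  | case2 seq t h hsp =>
    intro st
    rw [pvStripTrail_eq_self seq (by intro t' heq; rw [h] at heq; injection heq with e; exact e ▸ hsp)]
  | case3 seq h =>
    intro st
    rw [pvStripTrail_eq_self seq (by intro t' heq; rw [h] at heq; cases heq)]

-- main bridge: splitting the separator-joined pieces = folding B's piece step
theorem pvMain (pp : List (List (String × Int × Int))) :
    ∀ ws cur, pvFin ((pp.flatMap pvSep).foldl pvAStep (ws, cur)) =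
      pp.foldl pvBPiece (pvFin (ws, cur)) := by
  induction pp with
  | nil => intro ws cur; rfl
  | cons p pp ih =>
    intro ws cur
    cases p with
    | nil => simpa [pvSep, pvBPiece, pvBStep, pvFin] using ih ws cur
    | cons t r =>
      simp only [pvSep, List.flatMap_cons]
      rw [List.foldl_append, List.foldl_cons]
      have hsep : pvAStep (ws, cur) (" ", t.2.1, t.2.1) = (pvFin (ws, cur), []) := by
        by_cases hc : cur = [] <;> simp [pvAStep, pvFin, hc]
      rw [hsep]
      have h1 : pvFin (List.foldl pvAStep
            (List.foldl pvAStep (pvFin (ws, cur), []) (t :: r)) (pp.flatMap pvSep)) =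
          pp.foldl pvBPiece (pvFin (List.foldl pvAStep (pvFin (ws, cur), []) (t :: r))) :=
        ih (List.foldl pvAStep (pvFin (ws, cur), []) (t :: r)).1
           (List.foldl pvAStep (pvFin (ws, cur), []) (t :: r)).2
      rw [h1]
      conv_rhs => rw [List.foldl_cons, pvBPiece_eq]

-- the finalized split of the simply-merged list equals B
theorem pvT1 (pp : List (List (String × Int × Int))) :
    pvFin ((pp.foldl pvMergeSimple []).foldl pvAStep ([], [])) = pp.foldl pvBPiece [] := by
  induction pp with
  | nil => rfl
  | cons p pp ih =>
    cases p with
    | nil => simpa [pvMergeSimple, pvBPiece, pvBStep, pvFin] using ih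
    | cons t r =>
      simp only [List.foldl_cons]
      rw [show pvMergeSimple [] (t :: r) = t :: r by simp [pvMergeSimple]]
      rw [pvMergeSimple_ne pp (t :: r) (by simp), List.foldl_append]
      have h1 : pvFin (List.foldl pvAStep
            (List.foldl pvAStep (([] : List (List (String × Int × Int))), []) (t :: r))
            (pp.flatMap pvSep)) =
          pp.foldl pvBPiece (pvFin (List.foldl pvAStep ([], []) (t :: r))) :=
        pvMain pp (List.foldl pvAStep ([], []) (t :: r)).1
          (List.foldl pvAStep ([], []) (t :: r)).2
      rw [h1, pvBPiece_eq]

-- A computes the finalized split of the stripped merged list (the empty guards are redundant)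
theorem pvA_eq_fin (pp : List (List (String × Int × Int))) :
    final_ws_join_split_py pp =
      pvFin ((pvStripAnn ((PySem.List.enumerate pp).foldl pvMergeStep [])).foldl pvAStep ([], [])) := by
  unfold final_ws_join_split_py
  by_cases hpp : pp = []
  · subst hpp
    simp [PySem.List.enumerate_nil, pvStripAnn, pvStripLead, pvStripTrail_nil, pvFin]
  · simp only [hpp, if_false]
    set m := pvStripAnn ((PySem.List.enumerate pp).foldl pvMergeStep []) with hm
    by_cases hme : m = []
    · simp [hme, pvFin]
    · simp [hme, pvFin]

-- ===== VERDICT (by name: the statement is the Claim_ definition above) =====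
theorem final_ws_join_split_py_spec : Claim_equal_final_ws_join_split_py := by
  intro pp _
  unfold Spec_final_ws_join_split_py
  rw [pvA_eq_fin]
  unfold pvStripAnn
  rw [pvTrail, pvLead]
  rw [show (PySem.List.enumerate pp).foldl pvMergeStep [] = pp.foldl pvMergeSimple [] from ?_]
  · exact pvT1 pp
  · cases pp with
    | nil => rfl
    | cons p pp =>
      rw [PySem.List.enumerate_cons]
      simp only [List.foldl_cons]
      rw [show pvMergeStep [] ((0 : Int), p) = pvMergeSimple [] p by
        cases p <;> simp [pvMergeStep, pvMergeSimple]]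
      exact pvMerge_enum pp 1 _ (by omega)
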